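-- pv_equiv track=rewrite | github.com/OleksandrVahin/numerical-analysis | func_approx.py | finite_differences
-- ===== SOURCE A (Python) =====
-- def finite_differences(func_values):
--     """Takes values of function in nodes, returns list of finite differences all orders"""
--     n = len(func_values)
--     diffs = [func_values]
--     while n > 1:
--         diffs.append(tuple(diffs[-1][i + 1] - diffs[-1][i] for i in range(n - 1)))
--         n -= 1
--     del diffs[0]
--     return diffs
-- ===== SOURCE B (Python) =====
-- def finite_differences(func_values):
--     """Takes values of function in nodes, returns list of finite differences all orders"""
--     if len(func_values) <= 1:
--         return []
--     d = tuple(func_values[i + 1] - func_values[i] for i in range(len(func_values) - 1))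
--     return [d] + finite_differences(d)
-- ===== Notes on version B (the rewrite author's own statement) =====
-- stated objective: simpler
-- what changed: Replaced the mutated diffs-list/while-counter loop (append, diffs[-1] indexing, del diffs[0]) with the natural recursion: one first-order difference row, then recurse on it.
import Mathlib
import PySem

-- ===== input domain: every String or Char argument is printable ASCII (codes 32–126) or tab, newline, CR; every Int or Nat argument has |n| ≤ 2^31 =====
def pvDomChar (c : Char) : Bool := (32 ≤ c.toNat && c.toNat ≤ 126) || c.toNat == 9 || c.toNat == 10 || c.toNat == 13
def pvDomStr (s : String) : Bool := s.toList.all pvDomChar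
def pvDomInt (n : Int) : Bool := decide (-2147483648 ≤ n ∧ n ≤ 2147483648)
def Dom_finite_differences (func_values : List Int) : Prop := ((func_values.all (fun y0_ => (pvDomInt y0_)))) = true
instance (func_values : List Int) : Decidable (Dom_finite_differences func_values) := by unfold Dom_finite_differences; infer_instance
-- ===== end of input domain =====

-- B replaces A's mutated diffs-list/while-counter loop with the natural recursion
-- (first-order row, then recurse on it); objective: simpler. Same values, same subtraction order.

-- ===== PORT A =====
-- the while loop: state is the growing diffs list and the counter n
def finite_differences_loop (diffs : List (List Int)) (n : Nat) : List (List Int) :=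
  if n > 1 then
    -- diffs[-1]
    let last := (PySem.List.pyGet? diffs (-1)).getD []
    -- tuple(diffs[-1][i+1] - diffs[-1][i] for i in range(n-1))
    let row := (List.range (n - 1)).map
      (fun i => (PySem.List.pyGet? last ((i : Int) + 1)).getD 0 - (PySem.List.pyGet? last (i : Int)).getD 0)
    finite_differences_loop (diffs ++ [row]) (n - 1)
  else diffs
termination_by n

def finite_differences (func_values : List Int) : List (List Int) :=
  -- diffs = [func_values]; while …; del diffs[0]
  (finite_differences_loop [func_values] func_values.length).tail

-- ===== PORT B =====
def finite_differences_alt (func_values : List Int) : List (List Int) :=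
  if func_values.length ≤ 1 then []
  else
    let d := (List.range (func_values.length - 1)).map
      (fun i => (PySem.List.pyGet? func_values ((i : Int) + 1)).getD 0 - (PySem.List.pyGet? func_values (i : Int)).getD 0)
    d :: finite_differences_alt d
termination_by func_values.length
decreasing_by simp; omega

-- ===== PRECONDITION & SPEC =====
def Spec_finite_differences (func_values : List Int) (out : List (List Int)) : Prop := out = finite_differences_alt func_values
instance (func_values : List Int) (out : List (List Int)) : Decidable (Spec_finite_differences func_values out) := by unfold Spec_finite_differences; infer_instance

-- ===== CLAIM (what is proved, stated in full; the proofs are below) =====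
def Claim_equal_finite_differences : Prop := ∀ (func_values : List Int), Dom_finite_differences func_values → Spec_finite_differences func_values (finite_differences func_values)

-- ===== LEMMAS AND PROOFS =====

-- loop invariant: with the last row cur of length n already in diffs, the loop appends exactly B's recursion on cur
lemma finite_differences_loop_eq (n : Nat) : ∀ (pre : List (List Int)) (cur : List Int),
    cur.length = n →
    finite_differences_loop (pre ++ [cur]) n = (pre ++ [cur]) ++ finite_differences_alt cur := by
  induction n using Nat.strong_induction_on with
  | _ n ih =>
    intro pre cur hlen
    by_cases h : n > 1
    · rw [finite_differences_loop, if_pos h]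
      have hlast : (PySem.List.pyGet? (pre ++ [cur]) (-1)).getD [] = cur := by
        rw [PySem.List.pyGet?_neg_one_append_singleton]; rfl
      rw [finite_differences_alt, if_neg (by omega)]
      simp only [hlast]
      have hrow : (List.range (n - 1)).map
          (fun i => (PySem.List.pyGet? cur ((i : Int) + 1)).getD 0 - (PySem.List.pyGet? cur (i : Int)).getD 0)
          = (List.range (cur.length - 1)).map
          (fun i => (PySem.List.pyGet? cur ((i : Int) + 1)).getD 0 - (PySem.List.pyGet? cur (i : Int)).getD 0) := by
        rw [hlen]
      rw [hrow]
      set d := (List.range (cur.length - 1)).map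
          (fun i => (PySem.List.pyGet? cur ((i : Int) + 1)).getD 0 - (PySem.List.pyGet? cur (i : Int)).getD 0) with hd
      have hdlen : d.length = n - 1 := by simp [hd, hlen]
      have := ih (n - 1) (by omega) (pre ++ [cur]) d hdlen
      rw [this]
      simp
    · rw [finite_differences_loop, if_neg h]
      rw [finite_differences_alt, if_pos (by omega)]
      simp

-- ===== VERDICT (by name: the statement is the Claim_ definition above) =====
theorem finite_differences_spec : Claim_equal_finite_differences := by
  intro fv _
  unfold Spec_finite_differences finite_differences
  have := finite_differences_loop_eq fv.length [] fv rfl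
  simp only [List.nil_append] at this
  rw [this]
  rfl
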